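-- pv_equiv track=rewrite | github.com/Garryrkk/EMAIL-SCRAPER | backend/app/discovery/extractor.py | _is_valid_name
-- ===== SOURCE A (Python) =====
-- def _is_valid_name(name: str) -> bool:
--     """Validate name."""
--     parts = name.split()
--     if len(parts) < 2:
--         return False
--     if any(len(part) < 2 for part in parts):
--         return False
--     # Avoid common false positives
--     if any(part.lower() in ['the', 'and', 'or', 'of', 'in', 'at'] for part in parts):
--         return False
--     return True
-- ===== SOURCE B (Python) =====
-- def _is_valid_name(name: str) -> bool:
--     # single character-level pass: no split(), validate each word as it ends
--     words = 0
--     cur = []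
--     for ch in name + ' ':
--         if ch.isspace():
--             if cur:
--                 if len(cur) < 2:
--                     return False
--                 if ''.join(cur).lower() in ('the', 'and', 'or', 'of', 'in', 'at'):
--                     return False
--                 words += 1
--                 cur = []
--         else:
--             cur.append(ch)
--     return words >= 2
-- ===== Notes on version B (the rewrite author's own statement) =====
-- stated objective: alternative
-- what changed: B never calls split(): it makes a single character-level pass over the string, building the current word char by char, validating it (length and stopword) the moment a whitespace ends it, and counting completed words; A first splits into a list and then runs three separate scans over it.
import Mathlib
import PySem

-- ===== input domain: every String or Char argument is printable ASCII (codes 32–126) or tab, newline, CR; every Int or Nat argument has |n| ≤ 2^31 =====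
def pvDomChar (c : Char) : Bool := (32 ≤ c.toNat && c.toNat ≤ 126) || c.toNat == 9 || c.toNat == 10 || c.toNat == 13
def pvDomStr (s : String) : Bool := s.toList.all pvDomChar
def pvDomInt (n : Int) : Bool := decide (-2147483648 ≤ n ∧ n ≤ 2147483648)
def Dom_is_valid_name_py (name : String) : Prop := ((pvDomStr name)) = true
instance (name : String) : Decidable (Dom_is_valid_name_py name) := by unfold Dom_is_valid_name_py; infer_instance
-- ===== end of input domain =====

-- B is a single character-level scan (no split()): it builds each word char by char, validates it the moment whitespace ends it, and counts completed words — a structurally different decomposition of the same check (objective: alternative).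


-- ===== PORT A =====
def is_valid_name_py (name : String) : Bool :=
  let parts := PySem.Str.split₀ name
  if parts.length < 2 then false
  else if parts.any (fun part => PySem.Str.len part < 2) then false
  else if parts.any (fun part =>
      ["the", "and", "or", "of", "in", "at"].contains (PySem.Str.lower part)) then false
  else true

-- ===== PORT B =====
-- Source B's for-loop over the characters of name + ' ' (cur = current word's chars, words =
-- completed-word count), as structural recursion; the early 'return False' = the false branches.
def pvScan : List Char → List Char → Nat → Bool
  | [], _, words => decide (2 ≤ words)
  | ch :: rest, cur, words =>
    if PySem.Chars.isspace ch then
      if cur.isEmpty then pvScan rest cur words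
      else if cur.length < 2 then false
      else if ["the", "and", "or", "of", "in", "at"].contains
          (PySem.Str.lower (String.ofList cur)) then false
      else pvScan rest [] (words + 1)
    else pvScan rest (cur ++ [ch]) words

def is_valid_name_py_alt (name : String) : Bool :=
  pvScan (name ++ " ").toList [] 0

-- ===== PRECONDITION & SPEC =====
def Spec_is_valid_name_py (name : String) (out : Bool) : Prop := out = is_valid_name_py_alt name
instance (name : String) (out : Bool) : Decidable (Spec_is_valid_name_py name out) := by unfold Spec_is_valid_name_py; infer_instance

-- ===== CLAIM (what is proved, stated in full; the proofs are below) =====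
def Claim_equal_is_valid_name_py : Prop := ∀ (name : String), Dom_is_valid_name_py name → Spec_is_valid_name_py name (is_valid_name_py name)

-- ===== LEMMAS AND PROOFS =====

-- per-word test shared by the characterisations below
def pvBad (w : List Char) : Bool :=
  w.length < 2 || ["the", "and", "or", "of", "in", "at"].contains
    (PySem.Str.lower (String.ofList w))

-- word-list view of B's scan: check each word, counting
def pvChk : List (List Char) → Nat → Bool
  | [], words => decide (2 ≤ words)
  | w :: ws, words => if pvBad w then false else pvChk ws (words + 1)

-- split₀.go's accumulator prepends
theorem pvGo_acc (cs : List Char) : ∀ (cur : List Char) (acc : List (List Char)),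
    PySem.Chars.split₀.go cs cur acc = acc.reverse ++ PySem.Chars.split₀.go cs cur [] := by
  induction cs with
  | nil => intro cur acc; simp [PySem.Chars.split₀.go]; split <;> simp
  | cons c rest ih =>
    intro cur acc
    simp only [PySem.Chars.split₀.go]
    split
    · split
      · exact ih _ _
      · rw [ih [] (cur.reverse :: acc), ih [] [cur.reverse]]; simp
    · exact ih _ _

-- B's char scan over cs + ' ' computes pvChk of the words split₀ finds
theorem pvScan_eq_chk (cs : List Char) : ∀ (cur : List Char) (words : Nat),
    pvScan (cs ++ [' ']) cur words =
      pvChk (PySem.Chars.split₀.go (cs ++ [' ']) cur.reverse []) words := by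
  induction cs with
  | nil =>
    intro cur words
    simp only [List.nil_append, pvScan, PySem.Chars.split₀.go]
    have hsp : PySem.Chars.isspace ' ' = true := by decide
    rw [hsp]
    simp only [if_true, List.isEmpty_reverse]
    by_cases hc : cur.isEmpty
    · simp [hc, pvChk]
    · simp only [hc, if_false, Bool.false_eq_true, List.isEmpty_nil, if_true,
        List.reverse_reverse, List.reverse_cons, List.reverse_nil, List.nil_append]
      simp only [pvChk, pvBad]
      split_ifs <;> simp_all <;> omega
  | cons c rest ih =>
    intro cur words
    simp only [List.cons_append, pvScan, PySem.Chars.split₀.go]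
    by_cases hsp : PySem.Chars.isspace c
    · simp only [hsp, if_true, List.isEmpty_reverse]
      by_cases hc : cur.isEmpty
      · rw [List.isEmpty_iff] at hc; subst hc; exact ih [] words
      · simp only [hc, if_false, Bool.false_eq_true]
        rw [pvGo_acc, ih]
        simp only [List.reverse_cons, List.reverse_nil, List.nil_append,
          List.reverse_reverse, List.singleton_append]
        simp only [pvChk, pvBad]
        split_ifs <;> simp_all <;> omega
    · simp only [hsp, Bool.false_eq_true, if_false]
      rw [ih]
      simp

-- pvChk = joint length-and-any-bad test
theorem pvChk_eq (ws : List (List Char)) : ∀ (words : Nat),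
    pvChk ws words = (decide (2 ≤ words + ws.length) && !ws.any pvBad) := by
  induction ws with
  | nil => intro words; simp [pvChk]
  | cons w ws ih =>
    intro words
    simp only [pvChk, ih, List.any_cons, List.length_cons]
    by_cases h : pvBad w
    · simp [h]
    · have he : words + 1 + ws.length = words + (ws.length + 1) := by omega
      rw [if_neg h, he]
      rw [Bool.not_or, show (!pvBad w) = true by simp [h], Bool.true_and]
      exact rfl

-- a trailing space adds no word
theorem pvGo_trailing_space (cs : List Char) : ∀ (cur : List Char) (acc : List (List Char)),
    PySem.Chars.split₀.go (cs ++ [' ']) cur acc = PySem.Chars.split₀.go cs cur acc := by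
  induction cs with
  | nil =>
    intro cur acc
    simp only [List.nil_append, PySem.Chars.split₀.go]
    norm_num [PySem.Chars.isspace]
    split <;> simp
  | cons c rest ih =>
    intro cur acc
    simp only [List.cons_append, PySem.Chars.split₀.go]
    split
    · split <;> exact ih _ _
    · exact ih _ _

-- any over a disjunction splits
theorem pvAny_or (l : List (List Char)) (p q : List Char → Bool) :
    (l.any fun x => p x || q x) = (l.any p || l.any q) := by
  induction l with
  | nil => rfl
  | cons a l ih => simp [List.any_cons, ih]; cases p a <;> cases q a <;> simp

-- ===== VERDICT (by name: the statement is the Claim_ definition above) =====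
theorem is_valid_name_py_spec : Claim_equal_is_valid_name_py := by
  intro name _
  unfold Spec_is_valid_name_py is_valid_name_py is_valid_name_py_alt
  have h1 : (name ++ " ").toList = name.toList ++ [' '] := by simp
  rw [h1, pvScan_eq_chk, pvGo_trailing_space]
  have h2 : PySem.Chars.split₀.go name.toList [] [] = PySem.Chars.split₀ name.toList := rfl
  rw [List.reverse_nil, h2, pvChk_eq]
  simp only [PySem.Str.split₀, List.length_map, List.any_map, Nat.zero_add]
  have h3 : ∀ w : List Char, PySem.Str.len (String.ofList w) = w.length := by
    intro w; simp [PySem.Str.len]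
  have h4 : ∀ n : Nat, decide ((n : Int) < 2) = decide (n < 2) := by intro n; simp
  simp only [Function.comp_def, h3, h4]
  generalize PySem.Chars.split₀ name.toList = ws
  have hbd : pvBad = fun w => (decide (w.length < 2) || ["the", "and", "or", "of", "in", "at"].contains (PySem.Str.lower (String.ofList w))) := rfl
  rw [hbd, pvAny_or]
  split_ifs with hl ha hb <;> simp_all <;> omega
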